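-- pv_equiv track=rewrite | github.com/sdouf5054/20252R0136DATA30400 | _selftrain_baseline.py | add_parent_labels
-- ===== SOURCE A (Python) =====
-- def add_parent_labels(labels, child2parent, depth=-1):
--     """
--     Add parent labels based on hierarchy
--
--     Args:
--         labels: list of class IDs
--         child2parent: dict mapping child to parent
--         depth: how many levels to add
--             -1 = all ancestors (original behavior)
--             0 = no parents
--             1 = only direct parent
--             2 = parent + grandparent, etc.
--
--     Returns:
--         sorted list of labels with parents added
--     """
--     if depth == 0:
--         return sorted(list(set(labels)))
--
--     final_labels = set(labels)
--     for label in labels: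
--         current = label
--         levels = 0
--         while current in child2parent and (depth == -1 or levels < depth):
--             parent = child2parent[current]
--             final_labels.add(parent)
--             current = parent
--             levels += 1
--     return sorted(list(final_labels))
-- ===== SOURCE B (Python) =====
-- def add_parent_labels(labels, child2parent, depth=-1):
--     """Level-synchronous BFS over the whole frontier instead of walking one
--     ancestor chain per label: each hierarchy edge is traversed at most once."""
--     seen = set(labels)
--     frontier = set(labels)
--     levels = 0
--     while frontier and (depth == -1 or levels < depth):
--         frontier = {child2parent[x] for x in frontier if x in child2parent} - seen
--         seen |= frontier
--         levels += 1
--     return sorted(seen)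
-- ===== Notes on version B (the rewrite author's own statement) =====
-- stated objective: alternative
-- what changed: Replaced the per-label ancestor-chain walk (each label re-climbs the hierarchy separately) by a single level-synchronous BFS over a frontier set with a seen set, so every hierarchy edge is traversed at most once per level.
import Mathlib
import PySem

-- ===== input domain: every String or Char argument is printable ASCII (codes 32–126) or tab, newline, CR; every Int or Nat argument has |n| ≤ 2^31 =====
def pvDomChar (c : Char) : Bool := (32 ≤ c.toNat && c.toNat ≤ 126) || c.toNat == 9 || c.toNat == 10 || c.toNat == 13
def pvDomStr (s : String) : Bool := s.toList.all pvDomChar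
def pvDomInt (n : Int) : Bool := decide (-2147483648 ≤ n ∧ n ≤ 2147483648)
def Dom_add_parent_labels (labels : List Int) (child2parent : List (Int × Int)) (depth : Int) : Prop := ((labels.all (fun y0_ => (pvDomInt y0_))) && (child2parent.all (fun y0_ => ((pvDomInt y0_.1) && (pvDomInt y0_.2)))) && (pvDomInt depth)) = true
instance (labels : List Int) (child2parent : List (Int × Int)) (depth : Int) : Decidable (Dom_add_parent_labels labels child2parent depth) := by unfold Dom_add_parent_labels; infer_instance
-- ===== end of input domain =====

-- B replaces A's per-label ancestor-chain walk by one level-synchronous BFS over a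
-- frontier set with a seen set — a different traversal of the hierarchy (objective: alternative).

-- ===== PORT A =====
-- A's inner while loop: climb the parent chain from `current` while it is a dict key
-- and the level budget allows; fuel bounds the recursion (enough on every input Pre_ admits).
def aplChain (d : PySem.Dict Int Int) (depth : Int) : Nat → Int → Int → PySem.Set Int → PySem.Set Int
  | 0, _, _, s => s
  | fuel+1, current, levels, s =>
    match d.get? current with
    | none => s
    | some parent =>
      if depth == -1 || levels < depth then
        aplChain d depth fuel parent (levels + 1) (PySem.Set.add s parent)
      else s

def add_parent_labels (labels : List Int) (child2parent : List (Int × Int)) (depth : Int) : List Int :=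
  if depth == 0 then PySem.List.sorted (PySem.Set.ofList labels) (fun x => x)
  else
    let d := PySem.Dict.ofList child2parent
    let fuel := child2parent.length + depth.toNat + 1
    let finalLabels := labels.foldl (fun s label => aplChain d depth fuel label 0 s) (PySem.Set.ofList labels)
    PySem.List.sorted finalLabels (fun x => x)

-- ===== PORT B =====
-- the set comprehension {child2parent[x] for x in frontier if x in child2parent}
def bplParents (d : PySem.Dict Int Int) (frontier : PySem.Set Int) : PySem.Set Int :=
  frontier.foldl (fun acc x =>
    match d.get? x with
    | some p => PySem.Set.add acc p
    | none => acc) PySem.Set.empty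

-- B's while loop: frontier := parents(frontier) - seen; seen |= frontier; fuel bounds the
-- recursion (the loop adds a fresh dict value on every continuing step, so it is enough).
def bplLoop (d : PySem.Dict Int Int) (depth : Int) : Nat → Int → PySem.Set Int → PySem.Set Int → PySem.Set Int
  | 0, _, _, seen => seen
  | fuel+1, levels, frontier, seen =>
    if !frontier.isEmpty && (depth == -1 || levels < depth) then
      let f := PySem.Set.diff (bplParents d frontier) seen
      bplLoop d depth fuel (levels + 1) f (PySem.Set.union seen f)
    else seen

def add_parent_labels_alt (labels : List Int) (child2parent : List (Int × Int)) (depth : Int) : List Int :=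
  let d := PySem.Dict.ofList child2parent
  let seen := bplLoop d depth (child2parent.length + 2) 0 (PySem.Set.ofList labels) (PySem.Set.ofList labels)
  PySem.List.sorted seen (fun x => x)

-- ===== PRECONDITION & SPEC =====
-- does the parent chain from x leave the dict within the given number of lookups?
def chainEscapes (d : PySem.Dict Int Int) : Nat → Int → Bool
  | 0, _ => false
  | n+1, x =>
    match d.get? x with
    | none => true
    | some p => chainEscapes d n p

-- Pre_ excludes exactly the inputs on which A never returns (no value to match): with
-- depth = -1, a parent chain from some label that never leaves the dict (i.e. a cycle
-- reachable from a label) makes A's while loop run forever.  "No reachable cycle" is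
-- stated as: each label's chain leaves the key set within |dict| + 1 parent lookups,
-- which is exact because an escaping chain visits pairwise-distinct keys.  This is a
-- property of the input hierarchy only, not a re-run of either port.
def Pre_add_parent_labels (labels : List Int) (child2parent : List (Int × Int)) (depth : Int) : Prop :=
  depth = -1 → ∀ l ∈ labels, chainEscapes (PySem.Dict.ofList child2parent) (child2parent.length + 1) l = true

instance (labels : List Int) (child2parent : List (Int × Int)) (depth : Int) : Decidable (Pre_add_parent_labels labels child2parent depth) := by
  unfold Pre_add_parent_labels; infer_instance

def pvWitness_add_parent_labels : List Int × (List (Int × Int)) × Int := ([1, 2], [(1, 0), (2, 1)], -1)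

def Spec_add_parent_labels (labels : List Int) (child2parent : List (Int × Int)) (depth : Int) (out : List Int) : Prop := out = add_parent_labels_alt labels child2parent depth
instance (labels : List Int) (child2parent : List (Int × Int)) (depth : Int) (out : List Int) : Decidable (Spec_add_parent_labels labels child2parent depth out) := by unfold Spec_add_parent_labels; infer_instance

-- ===== CLAIM (what is proved, stated in full; the proofs are below) =====
def Claim_equal_add_parent_labels : Prop := ∀ (labels : List Int) (child2parent : List (Int × Int)) (depth : Int), Dom_add_parent_labels labels child2parent depth → Pre_add_parent_labels labels child2parent depth → Spec_add_parent_labels labels child2parent depth (add_parent_labels labels child2parent depth)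

-- ===== LEMMAS AND PROOFS =====

-- k-fold parent lookup
def iterP (d : PySem.Dict Int Int) : Nat → Int → Option Int
  | 0, x => some x
  | k+1, x =>
    match d.get? x with
    | none => none
    | some p => iterP d k p

-- y is the k-th ancestor of some label
def ReachL (d : PySem.Dict Int Int) (labels : List Int) (k : Nat) (y : Int) : Prop :=
  ∃ l ∈ labels, iterP d k l = some y

-- y is an ancestor at some level ≤ j
def UpTo (d : PySem.Dict Int Int) (labels : List Int) (j : Nat) (y : Int) : Prop :=
  ∃ k ≤ j, ReachL d labels k y

-- membership in the result both programs compute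
def SpecMem (d : PySem.Dict Int Int) (labels : List Int) (depth : Int) (y : Int) : Prop :=
  ∃ k : Nat, (k = 0 ∨ depth = -1 ∨ (k : Int) ≤ depth) ∧ ReachL d labels k y

lemma iterP_succ_right (d : PySem.Dict Int Int) (k : Nat) (x : Int) :
    iterP d (k+1) x = (iterP d k x).bind d.get? := by
  induction k generalizing x with
  | zero => simp only [iterP]; cases h : d.get? x <;> simp [h]
  | succ m ih =>
    cases h : d.get? x with
    | none =>
      have h1 : iterP d (m+1+1) x = none := by simp [iterP, h]
      have h2 : iterP d (m+1) x = none := by simp [iterP, h]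
      rw [h1, h2]; rfl
    | some p =>
      have h1 : iterP d (m+1+1) x = iterP d (m+1) p := by simp [iterP, h]
      have h2 : iterP d (m+1) x = iterP d m p := by simp [iterP, h]
      rw [h1, h2, ih p]

lemma aplChain_mem (d : PySem.Dict Int Int) (depth : Int) (fuel : Nat) (x : Int) (lv : Int)
    (s : PySem.Set Int) (y : Int)
    (hf : if depth = -1 then chainEscapes d fuel x = true else depth ≤ lv + (fuel : Int)) :
    y ∈ aplChain d depth fuel x lv s ↔
      y ∈ s ∨ ∃ k : Nat, 1 ≤ k ∧ (depth = -1 ∨ lv + (k : Int) ≤ depth) ∧ iterP d k x = some y := by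
  induction fuel generalizing x lv s with
  | zero =>
    by_cases hd : depth = -1
    · simp [hd, chainEscapes] at hf
    · rw [if_neg hd] at hf
      simp only [aplChain, Nat.cast_zero, add_zero] at hf ⊢
      constructor
      · exact Or.inl
      · rintro (h | ⟨k, hk1, hcond, _⟩)
        · exact h
        · rcases hcond with h1 | h2
          · exact absurd h1 hd
          · omega
  | succ n ih =>
    cases hg : d.get? x with
    | none =>
      have hred : aplChain d depth (n + 1) x lv s = s := by simp [aplChain, hg]
      rw [hred]
      constructor
      · exact Or.inl
      · rintro (h | ⟨k, hk1, hcond, hit⟩)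
        · exact h
        · obtain ⟨k', rfl⟩ : ∃ k', k = k' + 1 := ⟨k - 1, by omega⟩
          simp [iterP, hg] at hit
    | some p =>
      have hred : aplChain d depth (n + 1) x lv s =
          if (depth == -1 || decide (lv < depth)) = true then
            aplChain d depth n p (lv + 1) (s.add p) else s := by
        simp [aplChain, hg]
      rw [hred]
      by_cases hc : depth = -1 ∨ lv < depth
      · have hcb : (depth == -1 || decide (lv < depth)) = true := by
          rcases hc with h | h <;> simp [h]
        rw [if_pos hcb]
        have hf' : if depth = -1 then chainEscapes d n p = true else depth ≤ (lv + 1) + (n : Int) := by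
          by_cases hd : depth = -1
          · rw [if_pos hd] at hf ⊢
            simpa [chainEscapes, hg] using hf
          · rw [if_neg hd] at hf ⊢
            push_cast at hf ⊢
            omega
        rw [ih p (lv + 1) _ hf', PySem.Set.mem_add]
        constructor
        · rintro ((h | rfl) | ⟨k, hk1, hcond, hit⟩)
          · exact Or.inl h
          · refine Or.inr ⟨1, le_refl 1, ?_, by simp [iterP, hg]⟩
            rcases hc with h | h
            · exact Or.inl h
            · right; push_cast; omega
          · refine Or.inr ⟨k + 1, by omega, ?_, by simpa [iterP, hg] using hit⟩
            rcases hcond with h | h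
            · exact Or.inl h
            · right; push_cast at h ⊢; omega
        · rintro (h | ⟨k, hk1, hcond, hit⟩)
          · exact Or.inl (Or.inl h)
          · obtain ⟨k', rfl⟩ : ∃ k', k = k' + 1 := ⟨k - 1, by omega⟩
            have hit' : iterP d k' p = some y := by simpa [iterP, hg] using hit
            rcases Nat.eq_zero_or_pos k' with rfl | hk'
            · left; right
              simpa [iterP] using hit'.symm
            · refine Or.inr ⟨k', by omega, ?_, hit'⟩
              rcases hcond with h | h
              · exact Or.inl h
              · right; push_cast at h ⊢; omega
      · have hcb : (depth == -1 || decide (lv < depth)) = false := by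
          push Not at hc
          simp only [Bool.or_eq_false_iff, beq_eq_false_iff_ne, ne_eq, decide_eq_false_iff_not,
            not_lt]
          exact ⟨hc.1, hc.2⟩
        rw [if_neg (by simp [hcb])]
        constructor
        · exact Or.inl
        · rintro (h | ⟨k, hk1, hcond, _⟩)
          · exact h
          · push Not at hc
            rcases hcond with h1 | h2
            · exact absurd h1 hc.1
            · have := hc.2
              omega

lemma aplChain_nodup (d : PySem.Dict Int Int) (depth : Int) (fuel : Nat) (x : Int) (lv : Int)
    (s : PySem.Set Int) (hs : s.Nodup) : (aplChain d depth fuel x lv s).Nodup := by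
  induction fuel generalizing x lv s with
  | zero => exact hs
  | succ n ih =>
    cases hg : d.get? x with
    | none => simpa [aplChain, hg] using hs
    | some p =>
      have hred : aplChain d depth (n + 1) x lv s =
          if (depth == -1 || decide (lv < depth)) = true then
            aplChain d depth n p (lv + 1) (s.add p) else s := by
        simp [aplChain, hg]
      rw [hred]
      split
      · exact ih _ _ _ (PySem.Set.nodup_add s p hs)
      · exact hs

lemma aplFold_mem (d : PySem.Dict Int Int) (depth : Int) (fuel : Nat) (ls : List Int)
    (s : PySem.Set Int) (y : Int)
    (hf : ∀ l ∈ ls, if depth = -1 then chainEscapes d fuel l = true else depth ≤ (fuel : Int)) :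
    y ∈ ls.foldl (fun s label => aplChain d depth fuel label 0 s) s ↔
      y ∈ s ∨ ∃ l ∈ ls, ∃ k : Nat, 1 ≤ k ∧ (depth = -1 ∨ (k : Int) ≤ depth) ∧ iterP d k l = some y := by
  induction ls generalizing s with
  | nil => simp
  | cons l ls ih =>
    simp only [List.foldl_cons]
    rw [ih _ (fun l hl => hf l (List.mem_cons_of_mem _ hl))]
    have hfl := hf l (List.mem_cons_self ..)
    have hfl' : if depth = -1 then chainEscapes d fuel l = true else depth ≤ (0 : Int) + (fuel : Int) := by
      by_cases hd : depth = -1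
      · rwa [if_pos hd] at hfl ⊢
      · rw [if_neg hd] at hfl ⊢; omega
    rw [aplChain_mem d depth fuel l 0 s y hfl']
    simp only [List.mem_cons, zero_add]
    constructor
    · rintro ((h | ⟨k, hk⟩) | ⟨l', hl', hk⟩)
      · exact Or.inl h
      · exact Or.inr ⟨l, Or.inl rfl, k, hk⟩
      · exact Or.inr ⟨l', Or.inr hl', hk⟩
    · rintro (h | ⟨l', hl' | hl', hk⟩)
      · exact Or.inl (Or.inl h)
      · exact Or.inl (Or.inr (hl' ▸ hk))
      · exact Or.inr ⟨l', hl', hk⟩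

lemma aplFold_nodup (d : PySem.Dict Int Int) (depth : Int) (fuel : Nat) (ls : List Int)
    (s : PySem.Set Int) (hs : s.Nodup) :
    (ls.foldl (fun s label => aplChain d depth fuel label 0 s) s).Nodup := by
  induction ls generalizing s with
  | nil => exact hs
  | cons l ls ih => exact ih _ (aplChain_nodup d depth fuel l 0 s hs)

lemma bplParents_mem (d : PySem.Dict Int Int) (fr : PySem.Set Int) (y : Int) :
    y ∈ bplParents d fr ↔ ∃ x ∈ fr, d.get? x = some y := by
  have aux : ∀ (l : List Int) (acc : PySem.Set Int),
      y ∈ l.foldl (fun acc x =>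
        match d.get? x with
        | some p => PySem.Set.add acc p
        | none => acc) acc ↔ y ∈ acc ∨ ∃ x ∈ l, d.get? x = some y := by
    intro l
    induction l with
    | nil => simp
    | cons a l ih =>
      intro acc
      simp only [List.foldl_cons]
      rw [ih]
      cases hg : d.get? a with
      | none =>
        simp only [List.mem_cons]
        constructor
        · rintro (h | ⟨x, hx, hxy⟩)
          · exact Or.inl h
          · exact Or.inr ⟨x, Or.inr hx, hxy⟩
        · rintro (h | ⟨x, rfl | hx, hxy⟩)
          · exact Or.inl h
          · exact absurd hxy (by simp [hg])
          · exact Or.inr ⟨x, hx, hxy⟩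
      | some p =>
        rw [PySem.Set.mem_add]
        simp only [List.mem_cons]
        constructor
        · rintro ((h | rfl) | ⟨x, hx, hxy⟩)
          · exact Or.inl h
          · exact Or.inr ⟨a, Or.inl rfl, hg⟩
          · exact Or.inr ⟨x, Or.inr hx, hxy⟩
        · rintro (h | ⟨x, rfl | hx, hxy⟩)
          · exact Or.inl (Or.inl h)
          · rw [hg] at hxy
            exact Or.inl (Or.inr (Option.some_injective _ hxy).symm)
          · exact Or.inr ⟨x, hx, hxy⟩
  rw [bplParents, aux]
  simp [PySem.Set.empty]

lemma bplLoop_nil (d : PySem.Dict Int Int) (depth : Int) (fuel : Nat) (lv : Int)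
    (seen : PySem.Set Int) : bplLoop d depth fuel lv [] seen = seen := by
  cases fuel <;> simp [bplLoop]

lemma bplLoop_nodup (d : PySem.Dict Int Int) (depth : Int) (fuel : Nat) (lv : Int)
    (fr seen : PySem.Set Int) (hs : seen.Nodup) : (bplLoop d depth fuel lv fr seen).Nodup := by
  induction fuel generalizing lv fr seen with
  | zero => exact hs
  | succ n ih =>
    simp only [bplLoop]
    split
    · exact ih _ _ _ (PySem.Set.nodup_union _ _ hs)
    · exact hs

lemma upTo_closed (d : PySem.Dict Int Int) (labels : List Int) (j : Nat)
    (hcl : ∀ y, ReachL d labels (j+1) y → UpTo d labels j y) :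
    ∀ k y, ReachL d labels k y → UpTo d labels j y := by
  intro k
  induction k with
  | zero =>
    intro y h
    exact ⟨0, Nat.zero_le j, h⟩
  | succ m ih =>
    intro y hy
    obtain ⟨l, hl, hit⟩ := hy
    rw [iterP_succ_right] at hit
    cases hz : iterP d m l with
    | none => rw [hz] at hit; simp at hit
    | some z =>
      rw [hz] at hit
      simp only [Option.bind_some] at hit
      obtain ⟨k', hk'le, l', hl', hit'⟩ := ih z ⟨l, hl, hz⟩
      by_cases hkj : k' = j
      · subst hkj
        exact hcl y ⟨l', hl', by rw [iterP_succ_right, hit', Option.bind_some, hit]⟩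
      · exact ⟨k' + 1, by omega, l', hl', by rw [iterP_succ_right, hit', Option.bind_some, hit]⟩

lemma reach_succ_cases (d : PySem.Dict Int Int) (labels : List Int) (j : Nat) (y : Int)
    (h : ReachL d labels (j + 1) y) : ∃ z, ReachL d labels j z ∧ d.get? z = some y := by
  obtain ⟨l, hl, hit⟩ := h
  rw [iterP_succ_right] at hit
  cases hz : iterP d j l with
  | none => rw [hz] at hit; simp at hit
  | some z =>
    rw [hz] at hit
    simp only [Option.bind_some] at hit
    exact ⟨z, ⟨l, hl, hz⟩, hit⟩

lemma reach_parent (d : PySem.Dict Int Int) (labels : List Int) (j : Nat) (z y : Int)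
    (hz : ReachL d labels j z) (hg : d.get? z = some y) : ReachL d labels (j + 1) y := by
  obtain ⟨l, hl, hit⟩ := hz
  exact ⟨l, hl, by rw [iterP_succ_right, hit, Option.bind_some, hg]⟩

lemma seen_eq_spec (d : PySem.Dict Int Int) (labels : List Int) (depth : Int) (j : Nat)
    (seen : PySem.Set Int)
    (hseen : ∀ y, y ∈ seen ↔ UpTo d labels j y)
    (hj : depth ≠ -1 → (j = 0 ∨ (j : Int) ≤ depth))
    (hsat : ∀ y, ReachL d labels (j + 1) y → UpTo d labels j y) :
    ∀ y, (y ∈ seen ↔ SpecMem d labels depth y) := by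
  intro y
  rw [hseen]
  constructor
  · rintro ⟨k, hk, hr⟩
    by_cases hd : depth = -1
    · exact ⟨k, Or.inr (Or.inl hd), hr⟩
    · rcases hj hd with h0 | hle
      · subst h0
        exact ⟨k, Or.inl (by omega), hr⟩
      · exact ⟨k, Or.inr (Or.inr (by omega)), hr⟩
  · rintro ⟨k, _, hr⟩
    exact upTo_closed d labels j hsat k y hr

lemma seen_eq_spec_exit (d : PySem.Dict Int Int) (labels : List Int) (depth : Int) (j : Nat)
    (seen : PySem.Set Int)
    (hseen : ∀ y, y ∈ seen ↔ UpTo d labels j y)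
    (hd : depth ≠ -1) (hdj : depth ≤ (j : Int)) (hj : j = 0 ∨ (j : Int) ≤ depth) :
    ∀ y, (y ∈ seen ↔ SpecMem d labels depth y) := by
  intro y
  rw [hseen]
  constructor
  · rintro ⟨k, hk, hr⟩
    rcases hj with h0 | hle
    · subst h0
      exact ⟨k, Or.inl (by omega), hr⟩
    · by_cases hk0 : k = 0
      · exact ⟨k, Or.inl hk0, hr⟩
      · exact ⟨k, Or.inr (Or.inr (by omega)), hr⟩
  · rintro ⟨k, hc, hr⟩
    refine ⟨k, ?_, hr⟩
    rcases hc with h | h | h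
    · omega
    · exact absurd h hd
    · omega

lemma get?_mem_values (d : PySem.Dict Int Int)
 {x y : Int} (h : d.get? x = some y) :
    y ∈ d.values := by
  have := PySem.Dict.mem_items_of_get?_eq_some d h
  exact List.mem_map.mpr ⟨(x, y), this, rfl⟩

lemma bplLoop_mem (d : PySem.Dict Int Int) (labels : List Int) (depth : Int) :
    ∀ (fuel j : Nat) (frontier seen : PySem.Set Int),
    (∀ y, y ∈ seen ↔ UpTo d labels j y) →
    (∀ y ∈ frontier, ReachL d labels j y) →
    (∀ y, ReachL d labels j y → y ∈ frontier ∨ ∃ k < j, ReachL d labels k y) →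
    (depth ≠ -1 → (j = 0 ∨ (j : Int) ≤ depth)) →
    ((d.values.filter (fun v => !seen.contains v)).length + 1 ≤ fuel) →
    ∀ y, (y ∈ bplLoop d depth fuel (j : Int) frontier seen ↔ SpecMem d labels depth y) := by
  intro fuel
  induction fuel with
  | zero =>
    intro j fr seen _ _ _ _ hfuel y
    omega
  | succ n ih =>
    intro j fr seen hseen hfr hcov hj hfuel y
    by_cases hfe : fr = []
    · subst hfe
      rw [bplLoop_nil]
      have hsat : ∀ y, ReachL d labels (j + 1) y → UpTo d labels j y := by
        intro y hy
        obtain ⟨z, hz, hg⟩ := reach_succ_cases d labels j y hy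
        rcases hcov z hz with hzf | ⟨k', hk', hz'⟩
        · exact absurd hzf (List.not_mem_nil)
        · exact ⟨k' + 1, by omega, reach_parent d labels k' z y hz' hg⟩
      exact seen_eq_spec d labels depth j seen hseen hj hsat y
    · by_cases hcnd : depth = -1 ∨ (j : Int) < depth
      · have h1 : fr.isEmpty = false := by
          cases fr with
          | nil => exact absurd rfl hfe
          | cons a t => rfl
        have hcb : (!fr.isEmpty && (depth == -1 || decide ((j : Int) < depth))) = true := by
          rcases hcnd with h | h <;> simp [h1, h]
        have hred : bplLoop d depth (n + 1) (j : Int) fr seen =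
            bplLoop d depth n ((j : Int) + 1) (PySem.Set.diff (bplParents d fr) seen)
              (PySem.Set.union seen (PySem.Set.diff (bplParents d fr) seen)) := by
          simp only [bplLoop, hcb, if_true]
        rw [hred]
        set f := PySem.Set.diff (bplParents d fr) seen with hfdef
        have hfmem : ∀ y, y ∈ f ↔ ((∃ x ∈ fr, d.get? x = some y) ∧ y ∉ seen) := by
          intro y
          rw [hfdef, PySem.Set.mem_diff, bplParents_mem]
        have hlev : ∀ y, ReachL d labels (j + 1) y → y ∈ f ∨ y ∈ seen := by
          intro y hy
          obtain ⟨z, hz, hg⟩ := reach_succ_cases d labels j y hy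
          rcases hcov z hz with hzf | ⟨k', hk', hz'⟩
          · by_cases hys : y ∈ seen
            · exact Or.inr hys
            · exact Or.inl ((hfmem y).mpr ⟨⟨z, hzf, hg⟩, hys⟩)
          · exact Or.inr ((hseen y).mpr ⟨k' + 1, by omega, reach_parent d labels k' z y hz' hg⟩)
        have hf_reach : ∀ y ∈ f, ReachL d labels (j + 1) y := by
          intro y hy
          obtain ⟨⟨x, hx, hg⟩, _⟩ := (hfmem y).mp hy
          exact reach_parent d labels j x y (hfr x hx) hg
        by_cases hfnil : f = []
        · rw [hfnil]
          have hu : PySem.Set.union seen ([] : List Int) = seen := by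
            simp [PySem.Set.union, PySem.Set.update]
          rw [hu, bplLoop_nil]
          have hsat : ∀ y, ReachL d labels (j + 1) y → UpTo d labels j y := by
            intro y hy
            rcases hlev y hy with hyf | hys
            · rw [hfnil] at hyf
              exact absurd hyf (List.not_mem_nil)
            · exact (hseen y).mp hys
          exact seen_eq_spec d labels depth j seen hseen hj hsat y
        · have hseen' : ∀ y, y ∈ PySem.Set.union seen f ↔ UpTo d labels (j + 1) y := by
            intro y
            rw [PySem.Set.mem_union]
            constructor
            · rintro (hy | hy)
              · obtain ⟨k, hk, hr⟩ := (hseen y).mp hy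
                exact ⟨k, by omega, hr⟩
              · exact ⟨j + 1, le_refl _, hf_reach y hy⟩
            · rintro ⟨k, hk, hr⟩
              by_cases hkj : k = j + 1
              · subst hkj
                rcases hlev y hr with h | h
                · exact Or.inr h
                · exact Or.inl h
              · exact Or.inl ((hseen y).mpr ⟨k, by omega, hr⟩)
          have hcov' : ∀ y, ReachL d labels (j + 1) y →
              y ∈ f ∨ ∃ k < j + 1, ReachL d labels k y := by
            intro y hy
            rcases hlev y hy with h | h
            · exact Or.inl h
            · obtain ⟨k, hk, hr⟩ := (hseen y).mp h
              exact Or.inr ⟨k, by omega, hr⟩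
          have hj' : depth ≠ -1 → (j + 1 = 0 ∨ ((j + 1 : Nat) : Int) ≤ depth) := by
            intro hd2
            rcases hcnd with h | h
            · exact absurd h hd2
            · right
              push_cast
              omega
          have hfuel' :
              (d.values.filter (fun v => !(PySem.Set.union seen f).contains v)).length + 1 ≤ n := by
            obtain ⟨a, ha⟩ := List.exists_mem_of_ne_nil f hfnil
            obtain ⟨⟨x, hx, hg⟩, hansee⟩ := (hfmem a).mp ha
            have hav : a ∈ d.values := get?_mem_values d hg
            have hauni : a ∈ PySem.Set.union seen f :=
              (PySem.Set.mem_union seen f a).mpr (Or.inr ha)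
            have himp : ∀ v : Int, (PySem.Set.union seen f).contains v = false →
                seen.contains v = false := by
              intro v hv
              cases h : seen.contains v with
              | false => rfl
              | true =>
                have hvm : v ∈ PySem.Set.union seen f :=
                  (PySem.Set.mem_union seen f v).mpr
                    (Or.inl ((PySem.Set.contains_iff seen v).mp h))
                have hvt := (PySem.Set.contains_iff (PySem.Set.union seen f) v).mpr hvm
                rw [hvt] at hv
                exact absurd hv (by simp)
            have heq : d.values.filter (fun v => !(PySem.Set.union seen f).contains v)
                = (d.values.filter (fun v => !seen.contains v)).filter
                    (fun v => !(PySem.Set.union seen f).contains v) := by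
              rw [List.filter_filter]
              apply List.filter_congr
              intro v _
              cases hv : (PySem.Set.union seen f).contains v with
              | true => simp [hv]
              | false =>
                simp [hv, himp v hv]
                intro hm
                have hc2 := (PySem.Set.contains_iff seen v).mpr hm
                rw [himp v hv] at hc2
                exact absurd hc2 (by simp)
            have hacont : seen.contains a = false := by
              cases h : seen.contains a with
              | false => rfl
              | true => exact absurd ((PySem.Set.contains_iff seen a).mp h) hansee
            have hlt : (d.values.filter (fun v => !(PySem.Set.union seen f).contains v)).length
                < (d.values.filter (fun v => !seen.contains v)).length := by
              rw [heq]
              apply List.length_filter_lt_length_iff_exists.mpr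
              refine ⟨a, List.mem_filter.mpr ⟨hav, by simpa using hansee⟩, ?_⟩
              simp [(PySem.Set.contains_iff (PySem.Set.union seen f) a).mpr hauni]
              exact fun _ => ha
            omega
          have hres := ih (j + 1) f (PySem.Set.union seen f) hseen' hf_reach hcov' hj' hfuel' y
          rw [show ((j + 1 : Nat) : Int) = (j : Int) + 1 by push_cast; ring] at hres
          exact hres
      · push Not at hcnd
        have hcb : (!fr.isEmpty && (depth == -1 || decide ((j : Int) < depth))) = false := by
          have h2 : ¬ ((j : Int) < depth) := by omega
          simp [hcnd.1, h2]
        have hred : bplLoop d depth (n + 1) (j : Int) fr seen = seen := by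
          simp [bplLoop, hcb]
        rw [hred]
        exact seen_eq_spec_exit d labels depth j seen hseen hcnd.1 (by omega) (hj hcnd.1) y


lemma dict_ofList_values_len (l : List (Int × Int)) :
    (PySem.Dict.ofList l).values.length ≤ l.length := by
  suffices h : ∀ (l : List (Int × Int)) (d : PySem.Dict Int Int),
      (l.foldl (fun d kv => d.insert kv.1 kv.2) d).items.length ≤ d.items.length + l.length by
    have h2 := h l PySem.Dict.empty
    have h3 : (PySem.Dict.ofList l).items.length ≤ l.length := by
      rw [show PySem.Dict.ofList l = l.foldl (fun d kv => d.insert kv.1 kv.2) PySem.Dict.empty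
        from rfl]
      have he : (PySem.Dict.empty : PySem.Dict Int Int).items.length = 0 := rfl
      omega
    simpa [PySem.Dict.values, List.length_map] using h3
  intro l
  induction l with
  | nil => intro d; simp
  | cons kv l ih =>
    intro d
    simp only [List.foldl_cons, List.length_cons]
    calc (l.foldl (fun d kv => d.insert kv.1 kv.2) (d.insert kv.1 kv.2)).items.length
        ≤ (d.insert kv.1 kv.2).items.length + l.length := ih _
      _ ≤ d.items.length + (l.length + 1) := by
          rw [PySem.Dict.items_insert]
          split <;> simp <;> omega

-- ===== VERDICT (by name: the statement is the Claim_ definition above) =====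
theorem add_parent_labels_spec : Claim_equal_add_parent_labels := by
  unfold Claim_equal_add_parent_labels
  intro labels c2p depth _ hPre
  unfold Spec_add_parent_labels
  have hseen0 : ∀ y, y ∈ PySem.Set.ofList labels ↔
      UpTo (PySem.Dict.ofList c2p) labels 0 y := by
    intro y
    rw [PySem.Set.mem_ofList]
    constructor
    · intro hy
      exact ⟨0, le_refl 0, ⟨y, hy, rfl⟩⟩
    · rintro ⟨k, hk, l, hl, hit⟩
      have hk0 : k = 0 := Nat.le_zero.mp hk
      subst hk0
      simp only [iterP] at hit
      injection hit with h
      exact h ▸ hl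
  have hfr0 : ∀ y ∈ PySem.Set.ofList labels, ReachL (PySem.Dict.ofList c2p) labels 0 y := by
    intro y hy
    exact ⟨y, (PySem.Set.mem_ofList labels y).mp hy, rfl⟩
  have hcov0 : ∀ y, ReachL (PySem.Dict.ofList c2p) labels 0 y →
      y ∈ PySem.Set.ofList labels ∨ ∃ k < 0, ReachL (PySem.Dict.ofList c2p) labels k y := by
    intro y hy
    obtain ⟨l, hl, hit⟩ := hy
    simp only [iterP] at hit
    injection hit with h
    exact Or.inl ((PySem.Set.mem_ofList labels y).mpr (h ▸ hl))
  have hfuel0 : ((PySem.Dict.ofList c2p).values.filter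
      (fun v => !(PySem.Set.ofList labels).contains v)).length + 1 ≤ c2p.length + 2 := by
    have h1 := List.length_filter_le (fun v => !(PySem.Set.ofList labels).contains v)
      (PySem.Dict.ofList c2p).values
    have h2 := dict_ofList_values_len c2p
    omega
  have hB : ∀ y, y ∈ bplLoop (PySem.Dict.ofList c2p) depth (c2p.length + 2) 0
      (PySem.Set.ofList labels) (PySem.Set.ofList labels) ↔
      SpecMem (PySem.Dict.ofList c2p) labels depth y := by
    have h := bplLoop_mem (PySem.Dict.ofList c2p) labels depth (c2p.length + 2) 0
      (PySem.Set.ofList labels) (PySem.Set.ofList labels) hseen0 hfr0 hcov0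
      (fun _ => Or.inl rfl) hfuel0
    simpa using h
  have hBn : (bplLoop (PySem.Dict.ofList c2p) depth (c2p.length + 2) 0
      (PySem.Set.ofList labels) (PySem.Set.ofList labels)).Nodup :=
    bplLoop_nodup (PySem.Dict.ofList c2p) depth (c2p.length + 2) 0
      (PySem.Set.ofList labels) (PySem.Set.ofList labels) (PySem.Set.nodup_ofList labels)
  by_cases h0 : depth = 0
  · subst h0
    have hA : ∀ y, y ∈ PySem.Set.ofList labels ↔
        SpecMem (PySem.Dict.ofList c2p) labels 0 y := by
      intro y
      rw [hseen0 y]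
      constructor
      · rintro ⟨k, hk, hr⟩
        exact ⟨k, Or.inl (Nat.le_zero.mp hk), hr⟩
      · rintro ⟨k, hc, hr⟩
        have hk0 : k = 0 := by
          rcases hc with h | h | h
          · exact h
          · exact absurd h (by norm_num)
          · omega
        exact ⟨k, Nat.le_of_eq hk0, hr⟩
    simp only [add_parent_labels, add_parent_labels_alt, BEq.rfl, if_true]
    exact PySem.List.sorted_eq_sorted_of_perm _ _ _ (fun a b h => h)
      ((List.perm_ext_iff_of_nodup (PySem.Set.nodup_ofList labels) hBn).mpr
        (fun a => (hA a).trans ((hB a).symm)))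
  · have hfA : ∀ l ∈ labels,
        if depth = -1 then
          chainEscapes (PySem.Dict.ofList c2p) (c2p.length + depth.toNat + 1) l = true
        else depth ≤ ((c2p.length + depth.toNat + 1 : Nat) : Int) := by
      intro l hl
      by_cases hdm : depth = -1
      · rw [if_pos hdm]
        rw [show c2p.length + depth.toNat + 1 = c2p.length + 1 by rw [hdm]; rfl]
        exact hPre hdm l hl
      · rw [if_neg hdm]
        push_cast
        omega
    have hA : ∀ y, y ∈ labels.foldl
        (fun s label => aplChain (PySem.Dict.ofList c2p) depth
          (c2p.length + depth.toNat + 1) label 0 s) (PySem.Set.ofList labels) ↔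
        SpecMem (PySem.Dict.ofList c2p) labels depth y := by
      intro y
      rw [aplFold_mem (PySem.Dict.ofList c2p) depth (c2p.length + depth.toNat + 1) labels
        (PySem.Set.ofList labels) y hfA]
      constructor
      · rintro (hy | ⟨l, hl, k, hk1, hc, hit⟩)
        · obtain ⟨k, hk, hr⟩ := (hseen0 y).mp hy
          exact ⟨k, Or.inl (Nat.le_zero.mp hk), hr⟩
        · exact ⟨k, Or.inr hc, ⟨l, hl, hit⟩⟩
      · rintro ⟨k, hc, l, hl, hit⟩
        rcases Nat.eq_zero_or_pos k with rfl | hk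
        · left
          simp only [iterP] at hit
          injection hit with h
          exact (PySem.Set.mem_ofList labels y).mpr (h ▸ hl)
        · right
          refine ⟨l, hl, k, hk, ?_, hit⟩
          rcases hc with h | h | h
          · omega
          · exact Or.inl h
          · exact Or.inr h
    have hAn := aplFold_nodup (PySem.Dict.ofList c2p) depth (c2p.length + depth.toNat + 1)
      labels (PySem.Set.ofList labels) (PySem.Set.nodup_ofList labels)
    have hne : (depth == (0 : Int)) = false := by simp [h0]
    simp only [add_parent_labels, add_parent_labels_alt, hne, Bool.false_eq_true, if_false]
    exact PySem.List.sorted_eq_sorted_of_perm _ _ _ (fun a b h => h)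
      ((List.perm_ext_iff_of_nodup hAn hBn).mpr (fun a => (hA a).trans ((hB a).symm)))
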